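-- pv_equiv track=rewrite | github.com/Minoo7/TDDE24 | tenta/2021_08_17/solutions_210817.py | facit_tuplify
-- ===== SOURCE A (Python) =====
-- def facit_tuplify(seq: list):
--     result = []
--     # Denna lösning sätter om listan i varje steg.
--     # Det går också att t.ex. iterera över index.
--     while seq:
--         if len(seq) < 2:
--             # Bara 1 element kvar.  Om det fanns 0 element kvar skulle
--             # vi inte ha gått in i loopen.
--             result.append((seq[0],))
--             return result
--         else:
--             # Första och sista
--             result.append((seq[0], seq[-1]))
--             # Slicing skapar en NY lista med vissa av elementen i den
--             # ursprungliga.  Detta ändrar INTE på indata.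
--             seq = seq[1:-1]
--     return result
-- ===== SOURCE B (Python) =====
-- def facit_tuplify(seq: list):
--     n = len(seq)
--     h = n // 2
--     result = list(zip(seq[:h], reversed(seq[n - h:])))
--     if n % 2:
--         result.append((seq[h],))
--     return result
-- ===== Notes on version B (the rewrite author's own statement) =====
-- stated objective: faster
-- what changed: Replaces A's while-loop that re-slices the list on every iteration with a single zip of the first half against the reversed second half plus an optional middle singleton.
import Mathlib
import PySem

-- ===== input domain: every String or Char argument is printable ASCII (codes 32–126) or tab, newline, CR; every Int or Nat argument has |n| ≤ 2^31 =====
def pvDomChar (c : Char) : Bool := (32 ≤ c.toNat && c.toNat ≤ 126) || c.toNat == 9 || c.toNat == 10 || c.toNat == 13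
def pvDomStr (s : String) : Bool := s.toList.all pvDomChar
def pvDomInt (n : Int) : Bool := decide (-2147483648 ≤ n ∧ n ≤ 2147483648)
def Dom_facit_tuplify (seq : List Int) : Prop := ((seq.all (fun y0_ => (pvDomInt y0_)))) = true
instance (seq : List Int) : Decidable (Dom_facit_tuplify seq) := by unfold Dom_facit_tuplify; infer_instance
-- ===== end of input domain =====

-- B zips the first half with the reversed second half in one pass instead of A's repeated
-- re-slicing loop; proved to return the same value on every input.

-- ===== PORT A =====
-- termination fact for A's loop: seq[1:-1] is two elements shorter
theorem pv_slice_len_lt (seq : List Int) (h : ¬ seq.length < 2) :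
    (PySem.List.slice seq (some 1) (some (-1))).length < seq.length := by
  rw [PySem.List.length_slice, PySem.List.clampIdx_neg_one]
  have h1 : PySem.List.clampIdx seq.length 1 = min 1 seq.length := by
    simp

  omega

-- A: while seq: if len(seq) < 2 append (seq[0],) and return; else append (seq[0], seq[-1]); seq = seq[1:-1]
def facitLoop (result : List (List Int)) (seq : List Int) : List (List Int) :=
  if seq = [] then result
  else if seq.length < 2 then
    result ++ [[(PySem.List.pyGet? seq 0).getD 0]]
  else
    facitLoop (result ++ [[(PySem.List.pyGet? seq 0).getD 0, (PySem.List.pyGet? seq (-1)).getD 0]])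
      (PySem.List.slice seq (some 1) (some (-1)))
termination_by seq.length
decreasing_by exact pv_slice_len_lt seq (by assumption)

def facit_tuplify (seq : List Int) : List (List Int) :=
  facitLoop [] seq

-- ===== PORT B =====
-- B: zip seq[:h] with reversed(seq[n-h:]); append the middle element if n is odd
def facit_tuplify_alt (seq : List Int) : List (List Int) :=
  let n := seq.length
  let h := n / 2
  let result := (List.zip (PySem.List.slice seq none (some (h : Int)))
      ((PySem.List.slice seq (some ((n - h : Nat) : Int)) none).reverse)).map
      (fun p => [p.1, p.2])
  if n % 2 ≠ 0 then result ++ [[(PySem.List.pyGet? seq (h : Int)).getD 0]] else result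

-- ===== PRECONDITION & SPEC =====
def Spec_facit_tuplify (seq : List Int) (out : List (List Int)) : Prop := out = facit_tuplify_alt seq
instance (seq : List Int) (out : List (List Int)) : Decidable (Spec_facit_tuplify seq out) := by unfold Spec_facit_tuplify; infer_instance

-- ===== CLAIM (what is proved, stated in full; the proofs are below) =====
def Claim_equal_facit_tuplify : Prop := ∀ (seq : List Int), Dom_facit_tuplify seq → Spec_facit_tuplify seq (facit_tuplify seq)

-- ===== LEMMAS AND PROOFS =====

theorem pv_slice_middle (x y : Int) (mid : List Int) :
    PySem.List.slice (x :: mid ++ [y]) (some 1) (some (-1)) = mid := by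
  simp [PySem.List.slice, PySem.List.clampIdx]
  rw [if_neg (by omega)]
  simp

theorem alt_nil : facit_tuplify_alt [] = [] := by decide

theorem alt_single (x : Int) : facit_tuplify_alt [x] = [[x]] := by
  unfold facit_tuplify_alt
  simp [PySem.List.slice, PySem.List.clampIdx]

theorem alt_step (x y : Int) (mid : List Int) :
    facit_tuplify_alt (x :: mid ++ [y]) = [x, y] :: facit_tuplify_alt mid := by
  unfold facit_tuplify_alt
  have hn : (x :: mid ++ [y]).length = mid.length + 2 := by simp
  simp only [hn]
  have h2 : (mid.length + 2) / 2 = mid.length / 2 + 1 := by omega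
  have h3 : mid.length + 2 - (mid.length / 2 + 1) = (mid.length - mid.length / 2) + 1 := by omega
  have h4 : (mid.length + 2) % 2 = mid.length % 2 := by omega
  rw [h2, h3, h4]
  rw [PySem.List.slice_to_natCast, PySem.List.slice_from_natCast,
      PySem.List.slice_to_natCast, PySem.List.slice_from_natCast]
  rw [show (x :: mid ++ [y]) = x :: (mid ++ [y]) from rfl]
  rw [List.take_succ_cons, List.drop_succ_cons,
      List.take_append_of_le_length (by omega),
      List.drop_append_of_le_length (by omega)]
  simp only [List.reverse_append, List.reverse_singleton, List.singleton_append,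
    List.zip_cons_cons, List.map_cons]
  by_cases hpar : mid.length % 2 = 0
  · simp [hpar]
  · have hodd : mid.length % 2 = 1 := by omega
    have hlt : mid.length / 2 < mid.length := by omega
    simp only [hodd]
    have hget : PySem.List.pyGet? (x :: (mid ++ [y])) ((mid.length / 2 + 1 : Nat) : Int)
        = PySem.List.pyGet? mid ((mid.length / 2 : Nat) : Int) := by
      rw [PySem.List.pyGet?_natCast, PySem.List.pyGet?_natCast,
          List.getElem?_cons_succ, List.getElem?_append_left hlt]
    rw [hget]
    simp

theorem loop_eq : ∀ (n : Nat) (seq : List Int), seq.length ≤ n →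
    ∀ acc, facitLoop acc seq = acc ++ facit_tuplify_alt seq := by
  intro n
  induction n with
  | zero =>
    intro seq hlen acc
    have hnil : seq = [] := List.eq_nil_of_length_eq_zero (by omega)
    subst hnil
    rw [facitLoop]
    simp [alt_nil]
  | succ n ih =>
    intro seq hlen acc
    cases seq with
    | nil => rw [facitLoop]; simp [alt_nil]
    | cons x t =>
      rcases t.eq_nil_or_concat with rfl | ⟨mid, y, rfl⟩
      · rw [facitLoop]
        simp [alt_single]
      · simp only [List.concat_eq_append] at hlen ⊢
        rw [facitLoop]
        rw [if_neg (by simp), if_neg (by simp)]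
        have hget0 : PySem.List.pyGet? (x :: mid ++ [y]) 0 = some x := by
          simp [PySem.List.pyGet?_zero]
        have hgetm1 : PySem.List.pyGet? (x :: mid ++ [y]) (-1) = some y := by
          have h := PySem.List.pyGet?_neg_one_append_singleton (xs := x :: mid) (x := y)
          simpa using h
        rw [← List.cons_append]
        rw [pv_slice_middle x y mid, hget0, hgetm1]
        rw [ih mid (by simp at hlen; omega)]
        rw [show ((x :: mid) ++ [y]) = (x :: mid ++ [y]) from rfl, alt_step]
        simp

-- ===== VERDICT (by name: the statement is the Claim_ definition above) =====
theorem facit_tuplify_spec : Claim_equal_facit_tuplify := by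
  intro seq _
  unfold Spec_facit_tuplify facit_tuplify
  simpa using loop_eq seq.length seq le_rfl []
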